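-- pv_equiv track=rewrite | github.com/epilectrik/voynich | phases/AZC_REACHABILITY_SUPPRESSION/reachability_analysis.py | decompose_token
-- ===== SOURCE A (Python) =====
-- from typing import Dict, Set, List, Tuple, Optional
--
-- MARKER_FAMILIES = {'ch', 'sh', 'ok', 'ot', 'da', 'qo', 'ol', 'ct'}
--
-- EXTENDED_PREFIX_MAP = {
--     'kch': 'ch', 'pch': 'ch', 'tch': 'ch', 'sch': 'sh',
--     'dch': 'ch', 'rch': 'ch', 'fch': 'ch', 'lch': 'ch',
-- }
--
-- KNOWN_SUFFIXES = {
--     'ol', 'or', 'y', 'aiin', 'ar', 'chy', 'eeol',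
--     'ain', 'hy', 'al', 'am', 'an', 'ey', 'dy', 'in',
--     'eey', 'edy', 'eedy', 'edy', 'ey', 'r', 'l',
-- }
--
-- def decompose_token(token: str) -> Tuple[Optional[str], Optional[str], Optional[str]]:
--     """
--     Decompose a token into (PREFIX, MIDDLE, SUFFIX).
--     Returns (None, None, None) if token doesn't follow morphological pattern.
--     """
--     token_lower = token.lower()
--
--     # Detect prefix
--     detected_prefix = None
--
--     # Check extended prefixes first (3-char)
--     if len(token_lower) >= 3:
--         prefix3 = token_lower[:3]
--         if prefix3 in EXTENDED_PREFIX_MAP: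
--             detected_prefix = prefix3
--
--     # Check standard 2-char prefixes
--     if detected_prefix is None and len(token_lower) >= 2:
--         prefix2 = token_lower[:2]
--         if prefix2 in MARKER_FAMILIES:
--             detected_prefix = prefix2
--
--     if detected_prefix is None:
--         # Token doesn't have a recognized prefix
--         return (None, None, None)
--
--     remainder = token_lower[len(detected_prefix):]
--
--     if not remainder:
--         # Prefix-only token
--         return (detected_prefix, '', None)
--
--     # Find suffix (longest match from end)
--     detected_suffix = None
--     for suffix_len in range(min(4, len(remainder)), 0, -1):
--         candidate = remainder[-suffix_len:]
--         if candidate in KNOWN_SUFFIXES: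
--             detected_suffix = candidate
--             break
--
--     if detected_suffix is None:
--         # No recognized suffix
--         return (detected_prefix, remainder, None)
--
--     # Extract middle
--     middle_end = len(remainder) - len(detected_suffix)
--     detected_middle = remainder[:middle_end] if middle_end > 0 else ''
--
--     return (detected_prefix, detected_middle, detected_suffix)
-- ===== SOURCE B (Python) =====
-- MARKER_FAMILIES = {'ch', 'sh', 'ok', 'ot', 'da', 'qo', 'ol', 'ct'}
--
-- EXTENDED_PREFIX_MAP = {
--     'kch': 'ch', 'pch': 'ch', 'tch': 'ch', 'sch': 'sh',
--     'dch': 'ch', 'rch': 'ch', 'fch': 'ch', 'lch': 'ch',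
-- }
--
-- KNOWN_SUFFIXES = {
--     'ol', 'or', 'y', 'aiin', 'ar', 'chy', 'eeol',
--     'ain', 'hy', 'al', 'am', 'an', 'ey', 'dy', 'in',
--     'eey', 'edy', 'eedy', 'edy', 'ey', 'r', 'l',
-- }
--
--
-- def _detect_prefix(t):
--     # all extended prefixes have length 3, all marker families length 2,
--     # so a short slice can never be a member and no length guards are needed
--     if t[:3] in EXTENDED_PREFIX_MAP:
--         return t[:3]
--     if t[:2] in MARKER_FAMILIES:
--         return t[:2]
--     return None
--
--
-- def decompose_token(token):
--     t = token.lower()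
--     prefix = _detect_prefix(t)
--     if prefix is None:
--         return (None, None, None)
--     rem = t[len(prefix):]
--     if not rem:
--         return (prefix, '', None)
--     matches = [s for s in KNOWN_SUFFIXES if rem.endswith(s)]
--     if not matches:
--         return (prefix, rem, None)
--     suffix = max(matches, key=len)
--     return (prefix, rem[:len(rem) - len(suffix)], suffix)
-- ===== Notes on version B (the rewrite author's own statement) =====
-- stated objective: idiomatic
-- what changed: The length-descending slice-and-set-lookup suffix loop is replaced by collecting every known suffix the remainder ends with and taking the longest via max(key=len), and prefix detection drops the explicit length guards (a short slice can never equal a 3- or 2-char key).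
import Mathlib
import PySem

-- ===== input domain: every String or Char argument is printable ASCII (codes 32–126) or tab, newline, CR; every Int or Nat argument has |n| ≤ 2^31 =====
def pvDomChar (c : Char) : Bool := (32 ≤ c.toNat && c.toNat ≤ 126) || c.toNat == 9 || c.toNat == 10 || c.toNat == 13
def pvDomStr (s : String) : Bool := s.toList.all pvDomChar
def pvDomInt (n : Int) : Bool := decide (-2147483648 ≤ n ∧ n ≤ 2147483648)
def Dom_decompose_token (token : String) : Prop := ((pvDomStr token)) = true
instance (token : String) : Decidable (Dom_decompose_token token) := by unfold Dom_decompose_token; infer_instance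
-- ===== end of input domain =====

-- B replaces A's length-descending slice-and-lookup suffix loop by collecting every known
-- suffix the remainder ends with and taking the longest (objective: idiomatic).

-- shared literal constants (A's module-level sets, duplicates of the set literal removed)
def pvKnownSuffixes : List (List Char) :=
  [['o', 'l'], ['o', 'r'], ['y'], ['a', 'i', 'i', 'n'], ['a', 'r'], ['c', 'h', 'y'],
   ['e', 'e', 'o', 'l'], ['a', 'i', 'n'], ['h', 'y'], ['a', 'l'], ['a', 'm'], ['a', 'n'],
   ['e', 'y'], ['d', 'y'], ['i', 'n'], ['e', 'e', 'y'], ['e', 'd', 'y'],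
   ['e', 'e', 'd', 'y'], ['r'], ['l']]

def pvExtPrefixKeys : List (List Char) :=
  [['k', 'c', 'h'], ['p', 'c', 'h'], ['t', 'c', 'h'], ['s', 'c', 'h'],
   ['d', 'c', 'h'], ['r', 'c', 'h'], ['f', 'c', 'h'], ['l', 'c', 'h']]

def pvMarkerFamilies : List (List Char) :=
  [['c', 'h'], ['s', 'h'], ['o', 'k'], ['o', 't'], ['d', 'a'],
   ['q', 'o'], ['o', 'l'], ['c', 't']]

-- ===== PORT A =====
-- A's `for suffix_len in range(min(4, len(remainder)), 0, -1): … break` as the obvious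
-- descending recursion on the counter; `remainder[-suffix_len:]` with 1 ≤ suffix_len ≤ |remainder|
-- is exactly `r.drop (r.length - suffix_len)` (PySem.List.slice_from_neg_natCast).
def pvFindSuffixA (r : List Char) : Nat → Option (List Char)
  | 0 => none
  | k + 1 =>
    let cand := r.drop (r.length - (k + 1))
    if cand ∈ pvKnownSuffixes then some cand
    else pvFindSuffixA r k

def decompose_token (token : String) : Option String × Option String × Option String :=
  -- t = token.lower(); t[:3] = take 3, t[:2] = take 2, t[len(p):] = drop p.length (exact slices)
  match (match (if 3 ≤ (PySem.Chars.lower token.toList).length then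
                  (if (PySem.Chars.lower token.toList).take 3 ∈ pvExtPrefixKeys then
                     some ((PySem.Chars.lower token.toList).take 3)
                   else none)
                else none : Option (List Char)) with
         | some p => some p
         | none =>
           if 2 ≤ (PySem.Chars.lower token.toList).length then
             (if (PySem.Chars.lower token.toList).take 2 ∈ pvMarkerFamilies then
                some ((PySem.Chars.lower token.toList).take 2)
              else none)
           else none) with
  | none => (none, none, none)
  | some p =>
    if (PySem.Chars.lower token.toList).drop p.length = [] then
      (some (String.ofList p), some "", none)
    else
      match pvFindSuffixA ((PySem.Chars.lower token.toList).drop p.length)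
          (min 4 ((PySem.Chars.lower token.toList).drop p.length).length) with
      | none =>
        (some (String.ofList p), some (String.ofList ((PySem.Chars.lower token.toList).drop p.length)), none)
      | some s =>
        -- middle = remainder[:middle_end] if middle_end > 0 else ''
        (some (String.ofList p),
         some (if 0 < ((PySem.Chars.lower token.toList).drop p.length).length - s.length then
                 String.ofList (((PySem.Chars.lower token.toList).drop p.length).take
                   (((PySem.Chars.lower token.toList).drop p.length).length - s.length))
               else ""),
         some (String.ofList s))

-- ===== PORT B =====
-- every extended prefix has length 3 and every marker family length 2, so B's Python
-- drops the length guards: a shorter slice can never be a member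
def pvDetectPrefix (t : List Char) : Option (List Char) :=
  if t.take 3 ∈ pvExtPrefixKeys then some (t.take 3)
  else if t.take 2 ∈ pvMarkerFamilies then some (t.take 2)
  else none

def decompose_token_alt (token : String) : Option String × Option String × Option String :=
  match pvDetectPrefix (PySem.Chars.lower token.toList) with
  | none => (none, none, none)
  | some p =>
    if (PySem.Chars.lower token.toList).drop p.length = [] then
      (some (String.ofList p), some "", none)
    else
      -- [s for s in KNOWN_SUFFIXES if rem.endswith(s)], then max(matches, key=len)
      match PySem.List.max?
          (pvKnownSuffixes.filter
            (fun s => PySem.Chars.endswith ((PySem.Chars.lower token.toList).drop p.length) s))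
          (fun s => s.length) with
      | none =>
        (some (String.ofList p), some (String.ofList ((PySem.Chars.lower token.toList).drop p.length)), none)
      | some s =>
        (some (String.ofList p),
         some (String.ofList (((PySem.Chars.lower token.toList).drop p.length).take
           (((PySem.Chars.lower token.toList).drop p.length).length - s.length))),
         some (String.ofList s))

-- ===== PRECONDITION & SPEC =====
def Spec_decompose_token (token : String) (out : Option String × Option String × Option String) : Prop := out = decompose_token_alt token
instance (token : String) (out : Option String × Option String × Option String) : Decidable (Spec_decompose_token token out) := by unfold Spec_decompose_token; infer_instance

-- ===== CLAIM (what is proved, stated in full; the proofs are below) =====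
def Claim_equal_decompose_token : Prop := ∀ (token : String), Dom_decompose_token token → Spec_decompose_token token (decompose_token token)

-- ===== LEMMAS AND PROOFS =====

theorem pvSuffix_len : ∀ s ∈ pvKnownSuffixes, 1 ≤ s.length ∧ s.length ≤ 4 := by decide

theorem pvExt_len : ∀ s ∈ pvExtPrefixKeys, s.length = 3 := by decide

theorem pvMarker_len : ∀ s ∈ pvMarkerFamilies, s.length = 2 := by decide

-- the two prefix detections agree on every string
theorem pvPrefix_eq (t : List Char) :
    (match (if 3 ≤ t.length then
              (if t.take 3 ∈ pvExtPrefixKeys then some (t.take 3) else none)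
            else none : Option (List Char)) with
     | some p => some p
     | none =>
       if 2 ≤ t.length then
         (if t.take 2 ∈ pvMarkerFamilies then some (t.take 2) else none)
       else none) = pvDetectPrefix t := by
  unfold pvDetectPrefix
  by_cases h3 : t.take 3 ∈ pvExtPrefixKeys
  · have hl : 3 ≤ t.length := by
      have := pvExt_len _ h3
      simp [List.length_take] at this
      omega
    simp [h3, hl]
  · by_cases h2 : t.take 2 ∈ pvMarkerFamilies
    · have hl : 2 ≤ t.length := by
        have := pvMarker_len _ h2
        simp [List.length_take] at this
        omega
      by_cases hl3 : 3 ≤ t.length <;> simp [h3, h2, hl, hl3]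
    · by_cases hl3 : 3 ≤ t.length <;> by_cases hl2 : 2 ≤ t.length <;>
        simp [h3, h2, hl3, hl2]

theorem pvTail_mem_matches {r s : List Char} (hS : s ∈ pvKnownSuffixes) (hsuf : s <:+ r) :
    s ∈ pvKnownSuffixes.filter (fun s => PySem.Chars.endswith r s) := by
  exact List.mem_filter.mpr ⟨hS, (PySem.Chars.endswith_iff r s).mpr hsuf⟩

-- A's loop returns `none` when no admissible tail slice is a known suffix
theorem pvFindSuffixA_none (r : List Char) :
    ∀ k, k ≤ r.length → (∀ j, 1 ≤ j → j ≤ k → r.drop (r.length - j) ∉ pvKnownSuffixes) →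
      pvFindSuffixA r k = none := by
  intro k
  induction k with
  | zero => intro _ _; rfl
  | succ k ih =>
    intro hk h
    have hc : r.drop (r.length - (k + 1)) ∉ pvKnownSuffixes := h (k + 1) (by omega) le_rfl
    simp only [pvFindSuffixA, hc, ite_false]
    exact ih (by omega) (fun j h1 h2 => h j h1 (by omega))

-- A's loop returns the tail slice of the greatest admissible length that is a known suffix
theorem pvFindSuffixA_some (r : List Char) :
    ∀ k, k ≤ r.length → ∀ j0, 1 ≤ j0 → j0 ≤ k →
      r.drop (r.length - j0) ∈ pvKnownSuffixes →
      (∀ j, j0 < j → j ≤ k → r.drop (r.length - j) ∉ pvKnownSuffixes) →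
      pvFindSuffixA r k = some (r.drop (r.length - j0)) := by
  intro k
  induction k with
  | zero => intro _ j0 h1 h2 _ _; omega
  | succ k ih =>
    intro hk j0 h1 h2 hmem hmax
    by_cases hj : j0 = k + 1
    · subst hj
      simp only [pvFindSuffixA, hmem, ite_true]
    · have hc : r.drop (r.length - (k + 1)) ∉ pvKnownSuffixes :=
        hmax (k + 1) (by omega) le_rfl
      simp only [pvFindSuffixA, hc, ite_false]
      exact ih (by omega) j0 h1 (by omega) hmem (fun j ha hb => hmax j ha (by omega))

-- main lemma: A's suffix search equals B's longest-endswith selection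
theorem pvSuffix_eq (r : List Char) :
    pvFindSuffixA r (min 4 r.length) =
      PySem.List.max? (pvKnownSuffixes.filter (fun s => PySem.Chars.endswith r s))
        (fun s => s.length) := by
  set M := pvKnownSuffixes.filter (fun s => PySem.Chars.endswith r s) with hM
  by_cases hMe : M = []
  · rw [hMe, (PySem.List.max?_eq_none_iff (κ := Nat) ([] : List (List Char)) _).mpr rfl]
    apply pvFindSuffixA_none r _ (min_le_right _ _)
    intro j h1 hj hmem
    have hsuf : r.drop (r.length - j) <:+ r := List.drop_suffix _ _
    have : r.drop (r.length - j) ∈ M := hM ▸ pvTail_mem_matches hmem hsuf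
    simp [hMe] at this
  · obtain ⟨m, hm⟩ := Option.ne_none_iff_exists'.mp
      (fun h => hMe ((PySem.List.max?_eq_none_iff (κ := Nat) M _).mp h))
    rw [hm]
    have hmem : m ∈ M := PySem.List.max?_mem hm
    have hmax : ∀ y ∈ M, y.length ≤ m.length := PySem.List.max?_isMax hm
    have hmS : m ∈ pvKnownSuffixes := (List.mem_filter.mp hmem).1
    have hmsuf : m <:+ r := (PySem.Chars.endswith_iff r m).mp (List.mem_filter.mp hmem).2
    have hmdrop : r.drop (r.length - m.length) = m := (List.suffix_iff_eq_drop.mp hmsuf).symm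
    have hmlen := pvSuffix_len _ hmS
    have hmle : m.length ≤ r.length := hmsuf.length_le
    have hA := pvFindSuffixA_some r _ (min_le_right 4 r.length) m.length hmlen.1
      (le_min hmlen.2 hmle) (by rw [hmdrop]; exact hmS) ?_
    · rw [hA, hmdrop]
    intro j hja hjb hmemj
    have hjr : j ≤ r.length := le_trans hjb (min_le_right _ _)
    have hsuf : r.drop (r.length - j) <:+ r := List.drop_suffix _ _
    have hinM : r.drop (r.length - j) ∈ M := hM ▸ pvTail_mem_matches hmemj hsuf
    have hlen : (r.drop (r.length - j)).length = j := by
      simp [List.length_drop]; omega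
    have := hmax _ hinM
    omega

-- ===== VERDICT (by name: the statement is the Claim_ definition above) =====
theorem decompose_token_spec : Claim_equal_decompose_token := by
  intro token _
  unfold Spec_decompose_token decompose_token decompose_token_alt
  rw [pvPrefix_eq]
  cases hp : pvDetectPrefix (PySem.Chars.lower token.toList) with
  | none => rfl
  | some p =>
    simp only
    by_cases hre : (PySem.Chars.lower token.toList).drop p.length = []
    · simp [hre]
    · simp only [hre, ite_false]
      rw [pvSuffix_eq]
      cases hs : PySem.List.max?
          (pvKnownSuffixes.filter
            (fun s => PySem.Chars.endswith ((PySem.Chars.lower token.toList).drop p.length) s))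
          (fun s => s.length) with
      | none => rfl
      | some s =>
        simp
        omega
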